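-- pv_equiv track=rewrite | github.com/rsarwas/aoc | 2023-11/answers.py | location_map
-- ===== SOURCE A (Python) =====
-- def location_map(items, empties, factor):
--     """Create a dictionary mapping existing locations to new locations"""
--     new_locs = {}
--     new_loc = -1
--     for old_loc in range(max(items) + 1):
--         if old_loc in empties:
--             new_loc += factor
--         else:
--             new_loc += 1
--         new_locs[old_loc] = new_loc
--     return new_locs
-- ===== SOURCE B (Python) =====
-- def location_map(items, empties, factor):
--     """Create a dictionary mapping existing locations to new locations"""
--     m = max(items)
--     es = sorted({e for e in empties if 0 <= e <= m})
--     new_locs = {}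
--     offset = 0
--     prev = 0
--     for e in es:
--         for old in range(prev, e):
--             new_locs[old] = old + offset
--         offset += factor - 1
--         new_locs[e] = e + offset
--         prev = e + 1
--     for old in range(prev, m + 1):
--         new_locs[old] = old + offset
--     return new_locs
-- ===== Notes on version B (the rewrite author's own statement) =====
-- stated objective: alternative
-- what changed: Instead of testing membership in empties at every index while accumulating the destination position, B sorts the distinct in-range empties once and fills constant-offset runs between consecutive empty columns, computing each mapped value by a closed-form linear offset.
import Mathlib
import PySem

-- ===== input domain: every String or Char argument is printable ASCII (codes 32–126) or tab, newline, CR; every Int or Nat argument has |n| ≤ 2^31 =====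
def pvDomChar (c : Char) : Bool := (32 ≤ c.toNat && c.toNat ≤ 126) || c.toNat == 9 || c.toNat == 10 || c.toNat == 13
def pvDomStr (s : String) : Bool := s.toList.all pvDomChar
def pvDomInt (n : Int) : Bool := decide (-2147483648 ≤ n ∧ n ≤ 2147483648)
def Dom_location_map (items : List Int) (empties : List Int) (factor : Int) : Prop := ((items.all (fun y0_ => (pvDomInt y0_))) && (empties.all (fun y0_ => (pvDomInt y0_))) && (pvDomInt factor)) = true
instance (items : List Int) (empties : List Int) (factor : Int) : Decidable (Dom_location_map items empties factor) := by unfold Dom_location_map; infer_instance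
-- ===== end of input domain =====

-- B replaces A's per-index membership test and running destination with sorted distinct
-- in-range empties and constant-offset run filling (alternative algorithm, same results).


-- ===== PORT A =====
def location_map (items : List Int) (empties : List Int) (factor : Int) : List (Int × Int) :=
  match PySem.List.max? items id with
  | none => []   -- max([]) raises ValueError; excluded by Pre_
  | some m =>
    ((PySem.List.pyRange 0 (m + 1)).foldl
      (fun (s : PySem.Dict Int Int × Int) old_loc =>
        let new_loc := if old_loc ∈ empties then s.2 + factor else s.2 + 1
        (s.1.insert old_loc new_loc, new_loc))
      (PySem.Dict.empty, -1)).1.items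

-- ===== PORT B =====
def fillRun (a b offset : Int) (d : PySem.Dict Int Int) : PySem.Dict Int Int :=
  (PySem.List.pyRange a b).foldl (fun d old => d.insert old (old + offset)) d

def location_map_alt (items : List Int) (empties : List Int) (factor : Int) : List (Int × Int) :=
  match PySem.List.max? items id with
  | none => []   -- max([]) raises ValueError; excluded by Pre_
  | some m =>
    let es := PySem.List.sorted
      (PySem.Set.ofList (empties.filter (fun e => decide (0 ≤ e) && decide (e ≤ m)))) id
    let st := es.foldl
      (fun (s : PySem.Dict Int Int × Int × Int) e =>
        let d := fillRun s.2.2 e s.2.1 s.1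
        let offset := s.2.1 + (factor - 1)
        (d.insert e (e + offset), offset, e + 1))
      (PySem.Dict.empty, 0, 0)
    (fillRun st.2.2 (m + 1) st.2.1 st.1).items

-- ===== PRECONDITION & SPEC =====
-- Pre_ excludes exactly items = [], on which Python's max([]) raises ValueError (in A and in B).
def Pre_location_map (items : List Int) (_empties : List Int) (_factor : Int) : Prop := items ≠ []
instance (items : List Int) (empties : List Int) (factor : Int) : Decidable (Pre_location_map items empties factor) := by unfold Pre_location_map; infer_instance
def pvWitness_location_map : List Int × List Int × Int := ([3], [1], 2)

def Spec_location_map (items : List Int) (empties : List Int) (factor : Int) (out : List (Int × Int)) : Prop := out = location_map_alt items empties factor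
instance (items : List Int) (empties : List Int) (factor : Int) (out : List (Int × Int)) : Decidable (Spec_location_map items empties factor out) := by unfold Spec_location_map; infer_instance

-- ===== CLAIM (what is proved, stated in full; the proofs are below) =====
def Claim_equal_location_map : Prop := ∀ (items : List Int) (empties : List Int) (factor : Int), Dom_location_map items empties factor → Pre_location_map items empties factor → Spec_location_map items empties factor (location_map items empties factor)

-- ===== LEMMAS AND PROOFS =====

lemma countP_le_pred (es : List Int) (n : Int) :
    es.countP (fun e => decide (e ≤ n - 1)) = es.countP (fun e => decide (e < n)) := by
  apply List.countP_congr
  intro x _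
  constructor <;> intro h <;> simp only [decide_eq_true_eq] at * <;> omega

lemma countP_lt_step (es : List Int) (hnd : es.Nodup) (n : Int) :
    es.countP (fun e => decide (e ≤ n))
      = es.countP (fun e => decide (e < n)) + (if n ∈ es then 1 else 0) := by
  induction es with
  | nil => simp
  | cons a t ih =>
    rw [List.nodup_cons] at hnd
    obtain ⟨ha, ht⟩ := hnd
    have h2 := ih ht
    simp only [List.countP_cons, List.mem_cons]
    by_cases hc : a = n
    · subst hc
      simp only [ha, le_refl, decide_true, lt_self_iff_false, decide_false] at h2 ⊢
      simp [h2]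
    · have h1 : (decide (a ≤ n)) = (decide (a < n)) := by
        by_cases h : a < n
        · simp only [h, decide_true, decide_eq_true_eq]; omega
        · simp only [h, decide_false, decide_eq_false_iff_not]; omega
      have h3 : (n = a ∨ n ∈ t) ↔ (n ∈ t) := by
        constructor
        · rintro (rfl | h)
          · exact absurd rfl hc
          · exact h
        · exact Or.inr
      rw [h1, h2]
      simp only [h3]
      split_ifs <;> omega

lemma countP_zero_of_lt (es : List Int) (i : Int) (h : ∀ e ∈ es, i < e) :
    es.countP (fun e => decide (e ≤ i)) = 0 := by
  rw [List.countP_eq_zero]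
  intro e he
  have := h e he
  simp only [decide_eq_true_eq]
  omega

-- a fresh run of inserts appends to the dict's items
lemma fill_items (a b off : Int) (d : PySem.Dict Int Int)
    (h : ∀ i : Int, a ≤ i → i < b → d.contains i = false) :
    (fillRun a b off d).items
      = d.items ++ (PySem.List.pyRange a b).map (fun i => (i, i + off)) := by
  unfold fillRun
  have := PySem.Dict.items_foldl_insert_fresh (PySem.List.pyRange a b)
    (fun i => i) (fun i => i + off) d
    (by intro i hi
        rw [PySem.List.mem_pyRange_one] at hi
        exact h i hi.1 hi.2)
    (by rw [List.map_id']; exact PySem.List.nodup_pyRange_one a b)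
  exact this

-- invariant of A's single loop: after n iterations the dict sends each i to
-- i + (factor-1)*#(distinct in-range empties ≤ i) and new_loc holds the last value
lemma A_inv (empties es : List Int) (factor m : Int)
    (hnd : es.Nodup) (h0 : ∀ e ∈ es, 0 ≤ e)
    (hmem : ∀ x : Int, 0 ≤ x → x ≤ m → (x ∈ es ↔ x ∈ empties)) :
    ∀ n : Nat, (n : Int) ≤ m + 1 →
      (PySem.List.pyRange 0 (n : Int)).foldl
        (fun (s : PySem.Dict Int Int × Int) old_loc =>
          let new_loc := if old_loc ∈ empties then s.2 + factor else s.2 + 1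
          (s.1.insert old_loc new_loc, new_loc))
        (PySem.Dict.empty, -1)
      = (PySem.Dict.mk ((PySem.List.pyRange 0 (n : Int)).map
            (fun i => (i, i + (factor - 1) * (es.countP (fun e => decide (e ≤ i)) : Int)))),
         (n : Int) - 1 + (factor - 1) * (es.countP (fun e => decide (e ≤ (n : Int) - 1)) : Int)) := by
  intro n
  induction n with
  | zero =>
    intro _
    have hz : es.countP (fun e => decide (e ≤ (0 : Int) - 1)) = 0 :=
      countP_zero_of_lt es _ (fun e he => by have := h0 e he; omega)
    simp only [Nat.cast_zero]
    rw [PySem.List.pyRange_one_eq_nil (le_refl 0)]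
    simp only [List.foldl_nil, List.map_nil]
    refine Prod.ext (PySem.Dict.ext rfl) ?_
    rw [hz]
    ring
  | succ n ih =>
    intro hle
    have hc : ((n + 1 : Nat) : Int) = (n : Int) + 1 := by push_cast; ring
    have hn1 : (n : Int) ≤ m := by omega
    rw [hc, PySem.List.pyRange_one_succ_right (by positivity), List.foldl_append,
        ih (by omega)]
    simp only [List.foldl_cons, List.foldl_nil]
    have hcount := countP_lt_step es hnd (n : Int)
    rw [← countP_le_pred es (n : Int)] at hcount
    have hmemn := hmem (n : Int) (by positivity) hn1
    have hcont : (PySem.Dict.mk ((PySem.List.pyRange 0 (n : Int)).map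
        (fun i => (i, i + (factor - 1) * (es.countP (fun e => decide (e ≤ i)) : Int))))).contains
        (n : Int) = false := by
      rw [PySem.Dict.contains_eq_decide_mem_keys, PySem.Dict.keys_mk, List.map_map]
      rw [show ((fun (x : Int × Int) => x.1) ∘ (fun (i : Int) =>
            (i, i + (factor - 1) * (es.countP (fun e => decide (e ≤ i)) : Int))))
          = (fun (i : Int) => i) from rfl, List.map_id']
      simp only [decide_eq_false_iff_not, PySem.List.mem_pyRange_one]
      omega
    refine Prod.ext ?_ ?_
    · apply PySem.Dict.ext
      rw [PySem.Dict.items_insert_of_not_contains _ _ hcont]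
      show List.map _ _ ++ _ = List.map _ _
      rw [List.map_append, List.map_cons, List.map_nil]
      congr 1
      simp only [List.cons.injEq, and_true, Prod.mk.injEq, true_and]
      by_cases hni : (n : Int) ∈ empties
      · have hin : (n : Int) ∈ es := hmemn.mpr hni
        rw [if_pos hni, if_pos hin] at *
        rw [hcount]
        push_cast
        ring
      · have hout : (n : Int) ∉ es := fun hx => hni (hmemn.mp hx)
        rw [if_neg hni, if_neg hout] at *
        rw [hcount]
        push_cast
        ring
    · show (if ((n : Int)) ∈ empties then _ else _) = _
      rw [show ((n : Int) + 1 - 1) = (n : Int) from by ring]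
      by_cases hni : (n : Int) ∈ empties
      · have hin : (n : Int) ∈ es := hmemn.mpr hni
        rw [if_pos hni, if_pos hin] at *
        rw [hcount]
        push_cast
        ring
      · have hout : (n : Int) ∉ es := fun hx => hni (hmemn.mp hx)
        rw [if_neg hni, if_neg hout] at *
        rw [hcount]
        push_cast
        ring

-- invariant of B's run-filling loop
lemma B_inv (factor m : Int) :
    ∀ (rest : List Int) (prev off : Int) (d : PySem.Dict Int Int),
      rest.Pairwise (· < ·) → (∀ e ∈ rest, prev ≤ e ∧ e ≤ m) → 0 ≤ prev →
      d.keys = PySem.List.pyRange 0 prev →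
      (fillRun (rest.foldl
          (fun (s : PySem.Dict Int Int × Int × Int) e =>
            let d := fillRun s.2.2 e s.2.1 s.1
            let offset := s.2.1 + (factor - 1)
            (d.insert e (e + offset), offset, e + 1))
          (d, off, prev)).2.2 (m + 1)
        (rest.foldl
          (fun (s : PySem.Dict Int Int × Int × Int) e =>
            let d := fillRun s.2.2 e s.2.1 s.1
            let offset := s.2.1 + (factor - 1)
            (d.insert e (e + offset), offset, e + 1))
          (d, off, prev)).2.1
        (rest.foldl
          (fun (s : PySem.Dict Int Int × Int × Int) e =>
            let d := fillRun s.2.2 e s.2.1 s.1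
            let offset := s.2.1 + (factor - 1)
            (d.insert e (e + offset), offset, e + 1))
          (d, off, prev)).1).items
      = d.items ++ (PySem.List.pyRange prev (m + 1)).map
          (fun i => (i, i + off + (factor - 1) * (rest.countP (fun e => decide (e ≤ i)) : Int))) := by
  intro rest
  induction rest with
  | nil =>
    intro prev off d _ _ _ hkeys
    simp only [List.foldl_nil]
    rw [fill_items _ _ _ _ (by
      intro i hpi _
      rw [PySem.Dict.contains_eq_decide_mem_keys, hkeys]
      simp only [decide_eq_false_iff_not, PySem.List.mem_pyRange_one]
      omega)]
    congr 1
    apply List.map_congr_left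
    intro i _
    simp
  | cons e rest' ih =>
    intro prev off d hpw hbnd hprev hkeys
    rw [List.pairwise_cons] at hpw
    obtain ⟨hgt, hpw'⟩ := hpw
    have hpe : prev ≤ e := (hbnd e (List.mem_cons_self)).1
    have hem : e ≤ m := (hbnd e (List.mem_cons_self)).2
    have h0e : (0 : Int) ≤ e := le_trans hprev hpe
    simp only [List.foldl_cons]
    -- the step's dict
    have hfree : ∀ i : Int, prev ≤ i → i < e → d.contains i = false := by
      intro i h1 _
      rw [PySem.Dict.contains_eq_decide_mem_keys, hkeys]
      simp only [decide_eq_false_iff_not, PySem.List.mem_pyRange_one]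
      omega
    have hd'items : (fillRun prev e off d).items
        = d.items ++ (PySem.List.pyRange prev e).map (fun i => (i, i + off)) :=
      fill_items prev e off d hfree
    have hd'keys : (fillRun prev e off d).keys = PySem.List.pyRange 0 e := by
      show (fillRun prev e off d).items.map (·.1) = _
      rw [hd'items, List.map_append, List.map_map]
      have h1 : d.items.map (·.1) = PySem.List.pyRange 0 prev := hkeys
      rw [h1]
      rw [show ((fun (x : Int × Int) => x.1) ∘ (fun (i : Int) => (i, i + off)))
            = (fun (i : Int) => i) from rfl, List.map_id']
      rw [← PySem.List.pyRange_one_append 0 prev e hprev hpe]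
    have hconte : (fillRun prev e off d).contains e = false := by
      rw [PySem.Dict.contains_eq_decide_mem_keys, hd'keys]
      simp only [decide_eq_false_iff_not, PySem.List.mem_pyRange_one]
      omega
    have hd''items : ((fillRun prev e off d).insert e (e + (off + (factor - 1)))).items
        = d.items ++ (PySem.List.pyRange prev e).map (fun i => (i, i + off))
            ++ [(e, e + (off + (factor - 1)))] := by
      rw [PySem.Dict.items_insert_of_not_contains _ _ hconte, hd'items]
    have hd''keys : ((fillRun prev e off d).insert e (e + (off + (factor - 1)))).keys
        = PySem.List.pyRange 0 (e + 1) := by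
      show ((fillRun prev e off d).insert e (e + (off + (factor - 1)))).items.map (·.1) = _
      rw [hd''items]
      simp only [List.map_append, List.map_map, List.map_cons, List.map_nil]
      have h1 : d.items.map (·.1) = PySem.List.pyRange 0 prev := hkeys
      rw [h1, show ((fun (x : Int × Int) => x.1) ∘ (fun (i : Int) => (i, i + off)))
            = (fun (i : Int) => i) from rfl, List.map_id']
      rw [← PySem.List.pyRange_one_append 0 prev e hprev hpe,
          ← PySem.List.pyRange_one_succ_right h0e]
    have hih := ih (e + 1) (off + (factor - 1))
      ((fillRun prev e off d).insert e (e + (off + (factor - 1)))) hpw'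
      (by intro x hx
          have hx1 := hgt x hx
          have hx2 := (hbnd x (List.mem_cons_of_mem _ hx)).2
          omega)
      (by omega) hd''keys
    rw [hih, hd''items]
    rw [show PySem.List.pyRange prev (m + 1)
          = PySem.List.pyRange prev e ++ PySem.List.pyRange e (m + 1) from
        PySem.List.pyRange_one_append prev e (m + 1) hpe (by omega),
        PySem.List.pyRange_one_cons (show e < m + 1 by omega)]
    simp only [List.map_append, List.map_cons, List.append_assoc, List.cons_append,
      List.nil_append]
    congr 1
    congr 1
    · -- the run strictly before the empty column e
      apply List.map_congr_left
      intro i hi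
      rw [PySem.List.mem_pyRange_one] at hi
      have hc0 : (e :: rest').countP (fun x => decide (x ≤ i)) = 0 := by
        apply countP_zero_of_lt
        intro x hx
        rcases List.mem_cons.mp hx with rfl | hx'
        · omega
        · have := hgt x hx'; omega
      rw [hc0]
      simp
    · congr 1
      · -- the empty column e itself
        have hc1 : (e :: rest').countP (fun x => decide (x ≤ e)) = 1 := by
          rw [List.countP_cons]
          have hz : rest'.countP (fun x => decide (x ≤ e)) = 0 :=
            countP_zero_of_lt _ _ (fun x hx => hgt x hx)
          simp [hz]
        refine Prod.ext rfl ?_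
        rw [hc1]
        push_cast
        ring
      · -- the rest of the grid
        apply List.map_congr_left
        intro i hi
        rw [PySem.List.mem_pyRange_one] at hi
        have hc2 : (e :: rest').countP (fun x => decide (x ≤ i))
            = rest'.countP (fun x => decide (x ≤ i)) + 1 := by
          rw [List.countP_cons]
          simp only [decide_eq_true_eq]
          rw [if_pos (by omega)]
        rw [hc2]
        refine Prod.ext rfl ?_
        push_cast
        ring

-- ===== VERDICT (by name: the statement is the Claim_ definition above) =====
theorem location_map_spec : Claim_equal_location_map := by
  intro items empties factor _ _
  unfold Spec_location_map
  cases h : PySem.List.max? items id with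
  | none => simp [location_map, location_map_alt, h]
  | some m =>
    simp only [location_map, location_map_alt, h]
    have hmemf : ∀ x : Int,
        x ∈ PySem.List.sorted
          (PySem.Set.ofList (empties.filter (fun e => decide (0 ≤ e) && decide (e ≤ m)))) id
        ↔ (x ∈ empties ∧ 0 ≤ x ∧ x ≤ m) := by
      intro x
      rw [PySem.List.mem_sorted, PySem.Set.mem_ofList, List.mem_filter]
      simp
    set es := PySem.List.sorted
      (PySem.Set.ofList (empties.filter (fun e => decide (0 ≤ e) && decide (e ≤ m)))) id with hes
    have hnd : es.Nodup :=
      (PySem.List.sorted_perm _ _ _).nodup_iff.mpr (PySem.Set.nodup_ofList _)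
    have hle : es.Pairwise (· ≤ ·) := by
      have := PySem.List.sorted_pairwise
        (PySem.Set.ofList (empties.filter (fun e => decide (0 ≤ e) && decide (e ≤ m)))) id
      simpa [hes] using this
    have hpw : es.Pairwise (· < ·) :=
      (hle.and hnd).imp (fun h => lt_of_le_of_ne h.1 h.2)
    have h0 : ∀ e ∈ es, 0 ≤ e := fun e he => ((hmemf e).mp he).2.1
    have hbm : ∀ e ∈ es, e ≤ m := fun e he => ((hmemf e).mp he).2.2
    have hmem' : ∀ x : Int, 0 ≤ x → x ≤ m → (x ∈ es ↔ x ∈ empties) := by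
      intro x h1 h2
      rw [hmemf]
      tauto
    have hB := B_inv factor m es 0 0 PySem.Dict.empty hpw
      (fun e he => ⟨h0 e he, hbm e he⟩) (le_refl 0)
      (by show (PySem.Dict.empty : PySem.Dict Int Int).items.map (·.1) = _
          rw [PySem.List.pyRange_one_eq_nil (le_refl 0)]
          rfl)
    rw [hB]
    by_cases hm : 0 ≤ m + 1
    · have hA := A_inv empties es factor m hnd h0 hmem' (m + 1).toNat
        (by rw [Int.toNat_of_nonneg hm])
      rw [Int.toNat_of_nonneg hm] at hA
      rw [hA]
      show List.map _ _ = _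
      rw [show (PySem.Dict.empty : PySem.Dict Int Int).items = [] from rfl, List.nil_append]
      apply List.map_congr_left
      intro i _
      refine Prod.ext rfl ?_
      push_cast
      ring
    · have hr : PySem.List.pyRange 0 (m + 1) = [] := PySem.List.pyRange_one_eq_nil (by omega)
      rw [hr]
      simp [show (PySem.Dict.empty : PySem.Dict Int Int).items = [] from rfl]
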